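-- pv_equiv track=rewrite | github.com/bjpop/coglabweb | coglabweb/main.py | publications_by_year
-- ===== SOURCE A (Python) =====
-- def publications_by_year(publications):
--     year_map = {}
--     for this_publication in publications:
--         this_year = this_publication['year']
--         if this_year in year_map:
--             year_map[this_year].append(this_publication)
--         else:
--             year_map[this_year] = [this_publication]
--     year_assoc_list = year_map.items()
--     return sorted(year_assoc_list, reverse=True)
-- ===== SOURCE B (Python) =====
-- def publications_by_year(publications):
--     years = sorted({p['year'] for p in publications}, reverse=True)
--     return [(y, [p for p in publications if p['year'] == y]) for y in years]
-- ===== Notes on version B (the rewrite author's own statement) =====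
-- stated objective: simpler
-- what changed: Replaces the dict-grouping loop followed by a sort of the items with a two-line decomposition: sort the set of distinct years descending, then build each group by filtering the publications for that year.
import Mathlib
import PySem

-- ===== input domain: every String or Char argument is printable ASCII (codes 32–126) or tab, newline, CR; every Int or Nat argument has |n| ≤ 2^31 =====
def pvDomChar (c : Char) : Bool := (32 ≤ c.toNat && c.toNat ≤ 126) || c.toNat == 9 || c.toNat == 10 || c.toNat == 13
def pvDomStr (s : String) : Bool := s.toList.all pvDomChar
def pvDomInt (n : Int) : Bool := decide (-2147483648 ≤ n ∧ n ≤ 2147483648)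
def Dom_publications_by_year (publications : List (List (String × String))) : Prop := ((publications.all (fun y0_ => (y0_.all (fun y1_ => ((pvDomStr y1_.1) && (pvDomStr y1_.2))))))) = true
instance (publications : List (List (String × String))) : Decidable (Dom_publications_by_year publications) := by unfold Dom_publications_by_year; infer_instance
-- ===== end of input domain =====

-- B replaces A's dict-grouping-then-sort by "sort the distinct years descending, then filter the
-- publications for each year" — no dict, a simpler two-line decomposition (objective: simpler).

-- ===== PORT A =====
def publications_by_year (publications : List (List (String × String))) : List (String × (List (List (String × String)))) :=
  let year_map : PySem.Dict String (List (List (String × String))) :=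
    publications.foldl (fun year_map this_publication =>
      -- this_publication['year']; Pre_ guarantees the key is present (KeyError otherwise)
      let this_year := ((PySem.Dict.mk this_publication).get? "year").getD ""
      if year_map.contains this_year then
        year_map.modify this_year [] (fun g => g ++ [this_publication])
      else
        year_map.insert this_year [this_publication]) PySem.Dict.empty
  -- sorted(year_map.items(), reverse=True); the dict's keys are distinct, so Python's tuple
  -- comparison never reaches the second component: key = fst is exact here
  PySem.List.sorted year_map.items (fun kv => kv.1) true

-- ===== PORT B =====
def publications_by_year_alt (publications : List (List (String × String))) : List (String × (List (List (String × String)))) :=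
  let years := PySem.List.sorted
    (PySem.Set.ofList (publications.map (fun p => ((PySem.Dict.mk p).get? "year").getD "")))
    (fun y => y) true
  years.map (fun y => (y, publications.filter (fun p => ((PySem.Dict.mk p).get? "year").getD "" == y)))

-- ===== PRECONDITION & SPEC =====
-- Pre_ excludes exactly the inputs on which Python's A raises KeyError: a publication without a 'year' key.
def Pre_publications_by_year (publications : List (List (String × String))) : Prop :=
  (publications.all (fun p => (PySem.Dict.mk p).contains "year")) = true
instance (publications : List (List (String × String))) : Decidable (Pre_publications_by_year publications) := by unfold Pre_publications_by_year; infer_instance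
def pvWitness_publications_by_year : (List (List (String × String))) :=
  [[("year", "2020"), ("title", "a")], [("year", "2019"), ("title", "b")], [("year", "2020"), ("title", "c")]]

def Spec_publications_by_year (publications : List (List (String × String))) (out : List (String × (List (List (String × String))))) : Prop := out = publications_by_year_alt publications
instance (publications : List (List (String × String))) (out : List (String × (List (List (String × String))))) : Decidable (Spec_publications_by_year publications out) := by unfold Spec_publications_by_year; infer_instance

-- ===== CLAIM (what is proved, stated in full; the proofs are below) =====
def Claim_equal_publications_by_year : Prop := ∀ (publications : List (List (String × String))), Dom_publications_by_year publications → Pre_publications_by_year publications → Spec_publications_by_year publications (publications_by_year publications)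

-- ===== LEMMAS AND PROOFS =====

-- the year of a publication, as both ports read it
def pvYr (p : List (String × String)) : String := ((PySem.Dict.mk p).get? "year").getD ""

-- A's if/else loop body is exactly Dict.modify with default []
theorem pv_body_eq_modify (d : PySem.Dict String (List (List (String × String))))
    (y : String) (p : List (String × String)) :
    (if d.contains y then d.modify y [] (fun g => g ++ [p]) else d.insert y [p]) =
      d.modify y [] (fun g => g ++ [p]) := by
  by_cases h : d.contains y
  · simp [h, PySem.Dict.modify]
  · have h2 : d.getD y [] = [] := PySem.Dict.getD_of_not_contains d [] (Bool.not_eq_true _ ▸ h)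
    simp [h, PySem.Dict.modify, h2]

-- each entry of A's dict is the filter of the publications with that year
theorem pv_getD_char (publications : List (List (String × String))) (k : String) :
    (publications.foldl (fun d p => d.modify (pvYr p) [] (fun g => g ++ [p])) PySem.Dict.empty).getD k [] =
      publications.filter (fun p => pvYr p == k) := by
  have h1 : publications.foldl (fun d p => d.modify (pvYr p) [] (fun g => g ++ [p])) PySem.Dict.empty
      = (publications.map (fun p => (pvYr p, p))).foldl (fun d q => d.modify q.1 [] (fun g => g ++ [q.2])) PySem.Dict.empty := by
    rw [List.foldl_map]
  rw [h1, PySem.Dict.getD_foldl_modify_append, PySem.Dict.getD_empty]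
  rw [List.filter_map]
  simp [Function.comp_def, List.map_map]

-- A's dict's keys are the distinct years in first-occurrence order
theorem pv_keys_char (publications : List (List (String × String))) :
    (publications.foldl (fun d p => d.modify (pvYr p) [] (fun g => g ++ [p])) PySem.Dict.empty).keys =
      PySem.Set.ofList (publications.map pvYr) := by
  rw [PySem.Dict.keys_foldl_modify_key]
  simp only [PySem.Dict.keys_empty]
  rfl

theorem pv_nodup (publications : List (List (String × String))) :
    (publications.foldl (fun d p => d.modify (pvYr p) [] (fun g => g ++ [p])) PySem.Dict.empty).keys.Nodup :=
  PySem.Dict.nodup_keys_foldl_modify_key _ _ _ _ _ (by simp [PySem.Dict.keys_empty])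

-- A's dict, characterised: its items pair each distinct year (first-occurrence order) with the
-- filter of the publications having that year
theorem pv_items_char (publications : List (List (String × String))) :
    (publications.foldl (fun year_map this_publication =>
      let this_year := pvYr this_publication
      if year_map.contains this_year then
        year_map.modify this_year [] (fun g => g ++ [this_publication])
      else
        year_map.insert this_year [this_publication]) PySem.Dict.empty).items =
    (PySem.Set.ofList (publications.map pvYr)).map
      (fun k => (k, publications.filter (fun p => pvYr p == k))) := by
  have hb : (fun (year_map : PySem.Dict String (List (List (String × String)))) this_publication =>
      let this_year := pvYr this_publication
      if year_map.contains this_year then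
        year_map.modify this_year [] (fun g => g ++ [this_publication])
      else
        year_map.insert this_year [this_publication]) =
      (fun d p => d.modify (pvYr p) [] (fun g => g ++ [p])) := by
    funext d p
    exact pv_body_eq_modify d (pvYr p) p
  rw [hb, PySem.Dict.items_eq_map_keys _ (pv_nodup publications) [], pv_keys_char]
  apply List.map_congr_left
  intro k _
  rw [pv_getD_char]

-- sorting pairs by fst descending = mapping over the descending sort of the distinct keys
theorem pv_sorted_map (S : List String) (hnd : S.Nodup)
    (f : String → List (List (String × String))) :
    PySem.List.sorted (S.map (fun k => (k, f k))) (fun kv => kv.1) true =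
      (PySem.List.sorted S (fun y => y) true).map (fun k => (k, f k)) := by
  apply PySem.List.sorted_rev_eq_of_perm_of_pairwise_gt
  · exact ((PySem.List.sorted_perm S (fun y => y) true).map _)
  · have hle := PySem.List.sorted_pairwise_rev S (fun y => y)
    have hne : (PySem.List.sorted S (fun y => y) true).Nodup :=
      (PySem.List.sorted_perm S (fun y => y) true).nodup_iff.mpr hnd
    rw [List.pairwise_map]
    exact (hle.and hne).imp (fun h => lt_of_le_of_ne h.1 (Ne.symm h.2))

-- ===== VERDICT (by name: the statement is the Claim_ definition above) =====
theorem publications_by_year_spec : Claim_equal_publications_by_year := by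
  intro pubs _ _
  show PySem.List.sorted
      ((pubs.foldl (fun year_map this_publication =>
        let this_year := pvYr this_publication
        if year_map.contains this_year then year_map.modify this_year [] (fun g => g ++ [this_publication])
        else year_map.insert this_year [this_publication]) PySem.Dict.empty)).items (fun kv => kv.1) true
    = (PySem.List.sorted (PySem.Set.ofList (pubs.map pvYr)) (fun y => y) true).map
        (fun k => (k, pubs.filter (fun p => pvYr p == k)))
  rw [pv_items_char, pv_sorted_map _ (PySem.Set.nodup_ofList _)]
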